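-- pv_equiv track=rewrite | github.com/mod-elise/advent_of_code | 2025/day1/password.py | click_dial
-- ===== SOURCE A (Python) =====
-- def click_dial(position, direction, steps, zero_count, zero_count_pt2):
--     for i in range(steps):
--         position += direction
--         if position < 0:
--             position = 99
--         elif position > 99:
--             position = 0
--             zero_count_pt2 += 1
--         elif position == 0:
--             zero_count_pt2 += 1
--     if position == 0:
--         zero_count += 1
--     return position, zero_count, zero_count_pt2
-- ===== SOURCE B (Python) =====
-- def click_dial(position, direction, steps, zero_count, zero_count_pt2):
--     """Cycle detection: the dial has at most 101 reachable states, so find the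
--     first repeated position, then skip whole cycles with a division instead of
--     simulating every click."""
--     n = steps if steps > 0 else 0
--     pos = [position]   # pos[k] = position after k clicks
--     zs = [0]           # zs[k] = zero landings within the first k clicks
--     seen = {position: 0}
--     cur, zeros = position, 0
--     for k in range(n):
--         p = cur + direction
--         if p < 0:
--             p, dz = 99, 0
--         elif p > 99:
--             p, dz = 0, 1
--         else:
--             dz = 1 if p == 0 else 0
--         z = zeros + dz
--         if p in seen:
--             j = seen[p]
--             cycle = k + 1 - j
--             full, rem = divmod(n - (k + 1), cycle)
--             cur = pos[j + rem]
--             zeros = z + full * (z - zs[j]) + (zs[j + rem] - zs[j])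
--             break
--         pos.append(p)
--         zs.append(z)
--         seen[p] = k + 1
--         cur, zeros = p, z
--     return cur, zero_count + (1 if cur == 0 else 0), zero_count_pt2 + zeros
-- ===== Notes on version B (the rewrite author's own statement) =====
-- stated objective: faster
-- what changed: Replaces A's per-click simulation with cycle detection over the at most 101 reachable dial states: B records the trajectory until the first repeated position, then skips all remaining whole cycles with one divmod, so at most ~101 iterations run regardless of steps.
import Mathlib
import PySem

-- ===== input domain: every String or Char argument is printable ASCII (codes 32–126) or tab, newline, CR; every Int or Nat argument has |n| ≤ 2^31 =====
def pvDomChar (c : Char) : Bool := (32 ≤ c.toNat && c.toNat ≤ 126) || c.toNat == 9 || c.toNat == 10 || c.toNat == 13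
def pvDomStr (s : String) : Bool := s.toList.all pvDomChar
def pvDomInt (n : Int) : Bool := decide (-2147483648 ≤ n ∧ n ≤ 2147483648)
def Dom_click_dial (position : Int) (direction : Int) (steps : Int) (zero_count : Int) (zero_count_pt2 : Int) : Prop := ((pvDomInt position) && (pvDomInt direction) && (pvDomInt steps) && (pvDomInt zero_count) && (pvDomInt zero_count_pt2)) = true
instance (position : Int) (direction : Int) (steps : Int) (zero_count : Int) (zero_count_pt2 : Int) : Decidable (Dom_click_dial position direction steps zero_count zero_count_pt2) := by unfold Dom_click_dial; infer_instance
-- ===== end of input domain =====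

-- B replaces A's per-click simulation by cycle detection on the (at most 101)
-- reachable dial states, skipping whole cycles with one division; objective: faster.

-- ===== PORT A =====
-- loop body of A's for-loop, as a helper (state = (position, zero_count_pt2))
def pvStep (direction : Int) (st : Int × Int) : Int × Int :=
  let p := st.1 + direction
  if p < 0 then (99, st.2)
  else if p > 99 then (0, st.2 + 1)
  else if p = 0 then (p, st.2 + 1)
  else (p, st.2)

def click_dial (position : Int) (direction : Int) (steps : Int) (zero_count : Int) (zero_count_pt2 : Int) : List Int :=
  let st := (PySem.List.pyRange 0 steps 1).foldl (fun st _ => pvStep direction st) (position, zero_count_pt2)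
  let zc := if st.1 = 0 then zero_count + 1 else zero_count
  [st.1, zc, st.2]

-- ===== PORT B =====
-- B's for-loop: fuel counts the remaining iterations of `for k in range(n)`;
-- pos/zs/seen/cur/zeros are B's Python variables; the `some` branch is B's break.
def pvAltLoop (direction : Int) (n : Int) (fuel : Nat) (k : Int) (pos zs : List Int)
    (seen : PySem.Dict Int Int) (cur zeros : Int) : Int × Int :=
  match fuel with
  | 0 => (cur, zeros)
  | fuel + 1 =>
    let pd := cur + direction
    let pz : Int × Int :=
      if pd < 0 then (99, 0)
      else if pd > 99 then (0, 1)
      else (pd, if pd = 0 then 1 else 0)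
    let p := pz.1
    let z := zeros + pz.2
    match seen.get? p with
    | some j =>
      let cycle := k + 1 - j
      let full := PySem.Int.floordiv (n - (k + 1)) cycle
      let rem := PySem.Int.mod (n - (k + 1)) cycle
      -- pos[j + rem] / zs[j] / zs[j + rem]: indices always in range here
      ((PySem.List.pyGet? pos (j + rem)).getD 0,
       z + full * (z - (PySem.List.pyGet? zs j).getD 0)
         + ((PySem.List.pyGet? zs (j + rem)).getD 0 - (PySem.List.pyGet? zs j).getD 0))
    | none =>
      pvAltLoop direction n fuel (k + 1) (pos ++ [p]) (zs ++ [z]) (seen.insert p (k + 1)) p z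

def click_dial_alt (position : Int) (direction : Int) (steps : Int) (zero_count : Int) (zero_count_pt2 : Int) : List Int :=
  let n : Int := if steps > 0 then steps else 0
  let r := pvAltLoop direction n n.toNat 0 [position] [0]
      ((PySem.Dict.empty).insert position 0) position 0
  [r.1, zero_count + (if r.1 = 0 then 1 else 0), zero_count_pt2 + r.2]

-- ===== PRECONDITION & SPEC =====
def Spec_click_dial (position : Int) (direction : Int) (steps : Int) (zero_count : Int) (zero_count_pt2 : Int) (out : List Int) : Prop := out = click_dial_alt position direction steps zero_count zero_count_pt2
instance (position : Int) (direction : Int) (steps : Int) (zero_count : Int) (zero_count_pt2 : Int) (out : List Int) : Decidable (Spec_click_dial position direction steps zero_count zero_count_pt2 out) := by unfold Spec_click_dial; infer_instance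

-- ===== CLAIM (what is proved, stated in full; the proofs are below) =====
def Claim_equal_click_dial : Prop := ∀ (position : Int) (direction : Int) (steps : Int) (zero_count : Int) (zero_count_pt2 : Int), Dom_click_dial position direction steps zero_count zero_count_pt2 → Spec_click_dial position direction steps zero_count zero_count_pt2 (click_dial position direction steps zero_count zero_count_pt2)

-- ===== LEMMAS AND PROOFS =====

-- the position update of one click, and the position/zero trajectory it generates
def pvP (d p : Int) : Int :=
  let q := p + d
  if q < 0 then 99 else if q > 99 then 0 else q

def pvIter (d p0 : Int) : Nat → Int
  | 0 => p0
  | k + 1 => pvP d (pvIter d p0 k)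

def pvZ (d p0 : Int) : Nat → Int
  | 0 => 0
  | k + 1 => pvZ d p0 k + (if pvIter d p0 (k + 1) = 0 then 1 else 0)

-- A's loop body in terms of the trajectory
theorem pvStep_eq (d p z : Int) :
    pvStep d (p, z) = (pvP d p, z + if pvP d p = 0 then 1 else 0) := by
  simp only [pvStep, pvP]
  split_ifs with h1 h2 h3 <;> simp_all

-- folding a body that ignores the list elements is iteration
theorem pvFoldl_const {α β : Type} (f : α → α) : ∀ (l : List β) (s : α),
    l.foldl (fun st _ => f st) s = f^[l.length] s := by
  intro l
  induction l with
  | nil => intro s; simp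
  | cons a t ih =>
    intro s
    simp [List.foldl, ih, Function.iterate_succ_apply]

theorem pvIterate_eq (d p0 z0 : Int) : ∀ (m : Nat),
    (pvStep d)^[m] (p0, z0) = (pvIter d p0 m, z0 + pvZ d p0 m) := by
  intro m
  induction m with
  | zero => simp [pvIter, pvZ]
  | succ m ih =>
    rw [Function.iterate_succ_apply', ih, pvStep_eq]
    have hmp : pvIter d p0 (m + 1) = pvP d (pvIter d p0 m) := rfl
    rw [Prod.mk.injEq]
    refine ⟨hmp.symm, ?_⟩
    show z0 + pvZ d p0 m + _ = z0 + pvZ d p0 (m + 1)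
    rw [pvZ, hmp]
    ring

-- periodicity of the position trajectory after a repeat
theorem pvIter_per (d p0 : Int) (j L : Nat)
    (h : pvIter d p0 (j + L) = pvIter d p0 j) :
    ∀ t, pvIter d p0 (j + t + L) = pvIter d p0 (j + t) := by
  intro t
  induction t with
  | zero => simpa using h
  | succ t ih =>
    have e1 : j + (t + 1) + L = (j + t + L) + 1 := by omega
    rw [e1]
    show pvP d (pvIter d p0 (j + t + L)) = pvIter d p0 (j + t + 1)
    rw [ih]; rfl

-- the zero count gained over one period is the same in every period
theorem pvZ_per (d p0 : Int) (j L : Nat)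
    (h : pvIter d p0 (j + L) = pvIter d p0 j) :
    ∀ t, pvZ d p0 (j + t + L) - pvZ d p0 (j + t) = pvZ d p0 (j + L) - pvZ d p0 j := by
  intro t
  induction t with
  | zero => simp
  | succ t ih =>
    have e1 : j + (t + 1) + L = (j + t + L) + 1 := by omega
    have e2 : j + (t + 1) = (j + t) + 1 := by omega
    rw [e1, e2]
    show pvZ d p0 (j + t + L) + (if pvIter d p0 ((j + t + L) + 1) = 0 then 1 else 0)
        - (pvZ d p0 (j + t) + (if pvIter d p0 ((j + t) + 1) = 0 then 1 else 0))
        = pvZ d p0 (j + L) - pvZ d p0 j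
    have hind : pvIter d p0 ((j + t + L) + 1) = pvIter d p0 ((j + t) + 1) := by
      have := pvIter_per d p0 j L h (t + 1)
      rw [show j + (t + 1) + L = (j + t + L) + 1 by omega,
          show j + (t + 1) = (j + t) + 1 by omega] at this
      exact this
    rw [hind]
    omega

theorem pvIter_cycles (d p0 : Int) (j L : Nat)
    (h : pvIter d p0 (j + L) = pvIter d p0 j) :
    ∀ (c t : Nat), pvIter d p0 (j + t + c * L) = pvIter d p0 (j + t) := by
  intro c
  induction c with
  | zero => intro t; simp
  | succ c ih =>
    intro t
    rw [show j + t + (c + 1) * L = j + (t + c * L) + L by ring]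
    rw [pvIter_per d p0 j L h (t + c * L)]
    rw [show j + (t + c * L) = j + t + c * L by ring]
    exact ih t

theorem pvZ_cycles (d p0 : Int) (j L : Nat)
    (h : pvIter d p0 (j + L) = pvIter d p0 j) :
    ∀ (c t : Nat), pvZ d p0 (j + t + c * L)
      = pvZ d p0 (j + t) + (c : Int) * (pvZ d p0 (j + L) - pvZ d p0 j) := by
  intro c
  induction c with
  | zero => intro t; simp
  | succ c ih =>
    intro t
    have e1 : j + t + (c + 1) * L = j + (t + c * L) + L := by ring
    have h2 := pvZ_per d p0 j L h (t + c * L)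
    have e2 : j + (t + c * L) = j + t + c * L := by ring
    rw [e1, e2]
    rw [e2] at h2
    have h3 := ih t
    calc pvZ d p0 (j + t + c * L + L)
        = pvZ d p0 (j + t + c * L) + (pvZ d p0 (j + L) - pvZ d p0 j) := by linarith [h2]
      _ = pvZ d p0 (j + t) + (c : Int) * (pvZ d p0 (j + L) - pvZ d p0 j)
            + (pvZ d p0 (j + L) - pvZ d p0 j) := by rw [h3]
      _ = pvZ d p0 (j + t) + ((c + 1 : Nat) : Int) * (pvZ d p0 (j + L) - pvZ d p0 j) := by
            push_cast; ring

-- B's loop variables in one click, in terms of the trajectory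
theorem pvPz_eq (d p : Int) :
    (if p + d < 0 then ((99 : Int), (0 : Int))
     else if p + d > 99 then (0, 1)
     else (p + d, if p + d = 0 then 1 else 0))
    = (pvP d p, if pvP d p = 0 then 1 else 0) := by
  simp only [pvP]
  split_ifs with h1 h2 h3 <;> simp_all

-- the main invariant of B's loop: with pos/zs the trajectory tables up to k,
-- seen a table of valid (position ↦ earlier index) entries, and fuel = N - k
-- iterations left, the loop returns the state after N clicks
theorem pvAltLoop_eq (d p0 : Int) (N : Nat) :
    ∀ (fuel k : Nat) (pos zs : List Int) (seen : PySem.Dict Int Int),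
    fuel + k = N →
    pos = (List.range (k + 1)).map (pvIter d p0) →
    zs = (List.range (k + 1)).map (pvZ d p0) →
    (∀ x j, seen.get? x = some j → 0 ≤ j ∧ j ≤ (k : Int) ∧ pvIter d p0 j.toNat = x) →
    pvAltLoop d (N : Int) fuel (k : Int) pos zs seen (pvIter d p0 k) (pvZ d p0 k)
      = (pvIter d p0 N, pvZ d p0 N) := by
  intro fuel
  induction fuel with
  | zero =>
    intro k pos zs seen hfk _ _ _
    have : k = N := by omega
    subst this
    rfl
  | succ fuel ih =>
    intro k pos zs seen hfk hpos hzs hseen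
    rw [pvAltLoop]
    simp only
    rw [pvPz_eq d (pvIter d p0 k)]
    have hp : pvP d (pvIter d p0 k) = pvIter d p0 (k + 1) := rfl
    have hz : pvZ d p0 k + (if pvP d (pvIter d p0 k) = 0 then (1 : Int) else 0)
        = pvZ d p0 (k + 1) := rfl
    rw [hp] at *
    cases hget : seen.get? (pvIter d p0 (k + 1)) with
    | none =>
      -- no repeat yet: extend the tables and continue
      have h1 : pos ++ [pvIter d p0 (k + 1)] = (List.range (k + 1 + 1)).map (pvIter d p0) := by
        rw [hpos, List.range_succ (n := k + 1), List.map_append]; rfl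
      have h2 : zs ++ [pvZ d p0 k + (if pvIter d p0 (k + 1) = 0 then 1 else 0)]
          = (List.range (k + 1 + 1)).map (pvZ d p0) := by
        rw [hzs, List.range_succ (n := k + 1), List.map_append]; rfl
      have h3 : ∀ x j, (seen.insert (pvIter d p0 (k + 1)) ((k : Int) + 1)).get? x = some j →
          0 ≤ j ∧ j ≤ ((k + 1 : Nat) : Int) ∧ pvIter d p0 j.toNat = x := by
        intro x j hj
        rw [PySem.Dict.get?_insert] at hj
        by_cases hx : x = pvIter d p0 (k + 1)
        · rw [if_pos hx] at hj
          have : j = (k : Int) + 1 := by injection hj; omega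
          subst this
          refine ⟨by omega, by push_cast; omega, ?_⟩
          rw [show ((k : Int) + 1).toNat = k + 1 by omega, hx]
        · rw [if_neg hx] at hj
          obtain ⟨a, b, c⟩ := hseen x j hj
          exact ⟨a, by push_cast; omega, c⟩
      have := ih (k + 1) (pos ++ [pvIter d p0 (k + 1)])
        (zs ++ [pvZ d p0 k + (if pvIter d p0 (k + 1) = 0 then 1 else 0)])
        (seen.insert (pvIter d p0 (k + 1)) ((k : Int) + 1)) (by omega) h1 h2 h3
      rw [show (((k : Nat) + 1 : Nat) : Int) = (k : Int) + 1 by push_cast; ring] at this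
      exact this
    | some j =>
      -- repeat found: skip whole cycles
      dsimp only
      obtain ⟨hj0, hjk, hjit⟩ := hseen _ _ hget
      set jn := j.toNat with hjn
      have hjcast : (jn : Int) = j := Int.toNat_of_nonneg hj0
      have hjnk : jn ≤ k := by omega
      set L : Nat := k + 1 - jn with hL
      have hL1 : 1 ≤ L := by omega
      have hLe : jn + L = k + 1 := by omega
      have hper : pvIter d p0 (jn + L) = pvIter d p0 jn := by rw [hLe, hjit]
      have hcyc : (k : Int) + 1 - j = (L : Int) := by omega
      have hNk : k + 1 ≤ N := by omega
      have hLpos : (0 : Int) < (L : Int) := by omega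
      set r : Int := (N : Int) - ((k : Int) + 1) with hrdef
      have hr0 : (0 : Int) ≤ r := by rw [hrdef]; omega
      -- floor division with a positive divisor is ediv/emod
      have hfd : PySem.Int.floordiv r ((k : Int) + 1 - j) = r / (L : Int) := by
        rw [hcyc, PySem.Int.floordiv_eq_ediv_of_pos hLpos]
      have hmd : PySem.Int.mod r ((k : Int) + 1 - j) = r % (L : Int) := by
        rw [hcyc, PySem.Int.mod_eq_emod_of_pos hLpos]
      have hfull0 : 0 ≤ r / (L : Int) := Int.ediv_nonneg hr0 (le_of_lt hLpos)
      have hrem0 : 0 ≤ r % (L : Int) := Int.emod_nonneg r (by omega)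
      have hremL : r % (L : Int) < (L : Int) := Int.emod_lt_of_pos r hLpos
      set fulln : Nat := (r / (L : Int)).toNat with hfulln
      set remn : Nat := (r % (L : Int)).toNat with hremn
      have hfullcast : ((fulln : Nat) : Int) = r / (L : Int) := Int.toNat_of_nonneg hfull0
      have hremcast : ((remn : Nat) : Int) = r % (L : Int) := Int.toNat_of_nonneg hrem0
      have hremLn : remn < L := by omega
      have hdecomp : r = (fulln : Int) * (L : Int) + (remn : Int) := by
        rw [hfullcast, hremcast]
        have h := Int.mul_ediv_add_emod r (L : Int)
        linarith [h]
      have hNint : (N : Int) = (jn : Int) + (remn : Int) + ((fulln : Int) + 1) * (L : Int) := by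
        have hkL : (k : Int) + 1 = (jn : Int) + (L : Int) := by omega
        calc (N : Int) = r + ((k : Int) + 1) := by rw [hrdef]; ring
          _ = (fulln : Int) * (L : Int) + (remn : Int) + ((jn : Int) + (L : Int)) := by
              rw [← hdecomp, ← hkL]
          _ = (jn : Int) + (remn : Int) + ((fulln : Int) + 1) * (L : Int) := by ring
      have hNdecomp : N = jn + remn + (fulln + 1) * L := by
        have h : ((N : Nat) : Int) = ((jn + remn + (fulln + 1) * L : Nat) : Int) := by
          push_cast
          linear_combination hNint
        exact_mod_cast h
      -- list lookups hit the trajectory tables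
      have hposlen : pos.length = k + 1 := by rw [hpos]; simp
      have hzslen : zs.length = k + 1 := by rw [hzs]; simp
      have hjrem : j + r % (L : Int) = ((jn + remn : Nat) : Int) := by
        rw [← hjcast, ← hremcast]; push_cast; ring
      have hjremlt : jn + remn < k + 1 := by omega
      have hgetpos : (PySem.List.pyGet? pos (j + r % (L : Int))).getD 0
          = pvIter d p0 (jn + remn) := by
        rw [hjrem, PySem.List.pyGet?_natCast, hpos]
        rw [List.getElem?_map]
        simp [List.getElem?_range hjremlt]
      have hgetzsj : (PySem.List.pyGet? zs j).getD 0 = pvZ d p0 jn := by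
        rw [← hjcast, PySem.List.pyGet?_natCast, hzs]
        rw [List.getElem?_map]
        simp [List.getElem?_range (show jn < k + 1 by omega)]
      have hgetzsjr : (PySem.List.pyGet? zs (j + r % (L : Int))).getD 0
          = pvZ d p0 (jn + remn) := by
        rw [hjrem, PySem.List.pyGet?_natCast, hzs]
        rw [List.getElem?_map]
        simp [List.getElem?_range hjremlt]
      rw [hfd, hmd, hgetpos, hgetzsj, hgetzsjr]
      rw [Prod.mk.injEq]
      constructor
      · -- final position
        rw [hNdecomp, pvIter_cycles d p0 jn L hper (fulln + 1) remn]
      · -- zero count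
        have hZN : pvZ d p0 N
            = pvZ d p0 (jn + remn) + ((fulln : Int) + 1) * (pvZ d p0 (jn + L) - pvZ d p0 jn) := by
          rw [hNdecomp]
          have := pvZ_cycles d p0 jn L hper (fulln + 1) remn
          push_cast at this ⊢
          exact this
        rw [hZN, hLe, ← hfullcast, hz]
        ring

-- ===== VERDICT (by name: the statement is the Claim_ definition above) =====
theorem click_dial_spec : Claim_equal_click_dial := by
  unfold Claim_equal_click_dial Spec_click_dial
  intro position direction steps zero_count zero_count_pt2 _
  simp only [click_dial, click_dial_alt]
  rw [pvFoldl_const (pvStep direction), PySem.List.length_pyRange_one]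
  rw [pvIterate_eq]
  have hn : (if steps > 0 then steps else 0).toNat = steps.toNat := by
    split_ifs <;> omega
  have hncast : ((if steps > 0 then steps else 0) : Int)
      = ((steps.toNat : Nat) : Int) := by
    split_ifs <;> omega
  have hinit : ∀ x j, ((PySem.Dict.empty : PySem.Dict Int Int).insert position 0).get? x = some j →
      0 ≤ j ∧ j ≤ ((0 : Nat) : Int) ∧ pvIter direction position j.toNat = x := by
    intro x j hj
    rw [PySem.Dict.get?_insert] at hj
    by_cases hx : x = position
    · rw [if_pos hx] at hj
      have : j = 0 := by injection hj; omega
      subst this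
      exact ⟨le_refl 0, by norm_num, by rw [hx]; rfl⟩
    · rw [if_neg hx, PySem.Dict.get?_empty] at hj
      exact absurd hj (by simp)
  have hmain := pvAltLoop_eq direction position (steps.toNat)
      (steps.toNat) 0 [position] [0]
      ((PySem.Dict.empty : PySem.Dict Int Int).insert position 0)
      (by omega) (by simp [pvIter]) (by simp [pvZ]) hinit
  rw [hn, hncast]
  simp only [Nat.cast_zero] at hmain
  rw [show pvIter direction position 0 = position from rfl,
      show pvZ direction position 0 = 0 from rfl] at hmain
  rw [hmain]
  by_cases h : pvIter direction position steps.toNat = 0 <;> simp [h]
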